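-- pv_equiv track=rewrite | github.com/MyBlackCandy/exness | main.py | unique_columns
-- ===== SOURCE A (Python) =====
-- from typing import Any, Dict, List, Optional, Set
--
-- def unique_columns(rows: List[Dict[str, Any]]) -> List[str]:
--     cols = set()
--     for r in rows:
--         cols.update(r.keys())
--     preferred = [
--         "id", "partner_account", "partner_account_name", "client_uid",
--         "client_account", "client_account_type", "country", "currency",
--         "reg_date", "trade_finish", "volume_lots", "volume_usd",
--         "reward", "reward_usd", "comment",
--     ]
--     rest = [c for c in sorted(cols) if c not in preferred]
--     return [c for c in preferred if c in cols] + rest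
-- ===== SOURCE B (Python) =====
-- from typing import Any, Dict, List
--
-- PREFERRED = [
--     "id", "partner_account", "partner_account_name", "client_uid",
--     "client_account", "client_account_type", "country", "currency",
--     "reg_date", "trade_finish", "volume_lots", "volume_usd",
--     "reward", "reward_usd", "comment",
-- ]
--
-- def unique_columns(rows: List[Dict[str, Any]]) -> List[str]:
--     rank = {name: i for i, name in enumerate(PREFERRED)}
--     cols = set()
--     for r in rows:
--         cols.update(r.keys())
--     return sorted(cols, key=lambda c: (rank.get(c, len(PREFERRED)), c))
-- ===== Notes on version B (the rewrite author's own statement) =====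
-- stated objective: idiomatic
-- what changed: Replaces A's preferred-membership filter plus separately sorted remainder (filter + sort + filter + concatenation) with a single keyed sort over the key union, keyed by (rank of the name in the preferred list, defaulting past the end, then the name).
import Mathlib
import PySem

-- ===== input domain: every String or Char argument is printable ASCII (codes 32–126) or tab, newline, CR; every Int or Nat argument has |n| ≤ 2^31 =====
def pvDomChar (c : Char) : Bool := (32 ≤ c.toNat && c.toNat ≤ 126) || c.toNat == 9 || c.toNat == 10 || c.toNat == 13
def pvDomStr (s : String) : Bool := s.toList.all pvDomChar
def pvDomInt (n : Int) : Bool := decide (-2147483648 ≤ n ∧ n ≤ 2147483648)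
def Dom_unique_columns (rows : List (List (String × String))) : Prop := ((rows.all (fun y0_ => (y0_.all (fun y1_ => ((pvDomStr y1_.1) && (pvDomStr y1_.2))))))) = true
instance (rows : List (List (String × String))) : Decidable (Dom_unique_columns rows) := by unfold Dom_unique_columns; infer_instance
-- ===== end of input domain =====

-- B replaces A's "filter preferred, then append the sorted rest" with a single keyed sort
-- over the key union, keyed by (rank in the preferred list, name); objective: idiomatic.

-- the preferred-column literal, shared by both versions
def pvPreferred : List String :=
  ["id", "partner_account", "partner_account_name", "client_uid",
   "client_account", "client_account_type", "country", "currency",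
   "reg_date", "trade_finish", "volume_lots", "volume_usd",
   "reward", "reward_usd", "comment"]

-- ===== PORT A =====
def unique_columns (rows : List (List (String × String))) : List String :=
  let cols : PySem.Set String :=
    rows.foldl (fun s r => PySem.Set.update s (PySem.Dict.mk r).keys) PySem.Set.empty
  let preferred := pvPreferred
  let rest := (PySem.List.sorted cols (fun c => c)).filter (fun c => !preferred.contains c)
  preferred.filter (fun c => PySem.Set.contains cols c) ++ rest

-- ===== PORT B =====
def unique_columns_alt (rows : List (List (String × String))) : List String :=
  let rank : PySem.Dict String Int :=
    (PySem.List.enumerate pvPreferred 0).foldl (fun d p => d.insert p.2 p.1) PySem.Dict.empty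
  let cols : PySem.Set String :=
    rows.foldl (fun s r => PySem.Set.update s (PySem.Dict.mk r).keys) PySem.Set.empty
  PySem.List.sorted2 cols
    (fun c => PySem.Dict.getD rank c (pvPreferred.length : Int)) (fun c => c)

-- ===== PRECONDITION & SPEC =====
def Spec_unique_columns (rows : List (List (String × String))) (out : List String) : Prop := out = unique_columns_alt rows
instance (rows : List (List (String × String))) (out : List String) : Decidable (Spec_unique_columns rows out) := by unfold Spec_unique_columns; infer_instance

-- ===== CLAIM (what is proved, stated in full; the proofs are below) =====
def Claim_equal_unique_columns : Prop := ∀ (rows : List (List (String × String))), Dom_unique_columns rows → Spec_unique_columns rows (unique_columns rows)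

-- ===== LEMMAS AND PROOFS =====

-- the rank dictionary B builds, as a name for the proofs
def pvRank : PySem.Dict String Int :=
  (PySem.List.enumerate pvPreferred 0).foldl (fun d p => d.insert p.2 p.1) PySem.Dict.empty

-- B's sort key, packaged into one lexicographic linear order
def pvKey (c : String) : Lex (Int × String) := toLex (PySem.Dict.getD pvRank c (pvPreferred.length : Int), c)

-- sorted2 with keys (k1, k2) is 'sorted' with the lexicographic key
theorem sorted2_eq_sorted_lex {α : Type} (xs : List α) (k1 : α → Int) (k2 : α → String) :
    PySem.List.sorted2 xs k1 k2 = PySem.List.sorted xs (fun x => toLex (k1 x, k2 x)) := by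
  have hfun : (fun a b => decide (k1 a < k1 b) || (!decide (k1 b < k1 a) && decide (k2 a < k2 b)))
      = (fun a b => decide (toLex (k1 a, k2 a) < toLex (k1 b, k2 b))) := by
    funext a b
    by_cases h1 : k1 a < k1 b
    · simp [h1, Prod.Lex.toLex_lt_toLex]
    · by_cases h2 : k1 b < k1 a
      · simp [h1, h2, Prod.Lex.toLex_lt_toLex, ne_of_gt h2]
      · have heq : k1 a = k1 b := le_antisymm (not_lt.mp h2) (not_lt.mp h1)
        simp [heq, Prod.Lex.toLex_lt_toLex]
  show xs.foldl (fun acc x => PySem.List.insertBy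
      (fun a b => decide (k1 a < k1 b) || (!decide (k1 b < k1 a) && decide (k2 a < k2 b))) x acc) []
    = xs.foldl (fun acc x => PySem.List.insertBy
      (fun a b => decide (toLex (k1 a, k2 a) < toLex (k1 b, k2 b))) x acc) []
  rw [hfun]

theorem nodup_cols (rows : List (List (String × String))) (s : PySem.Set String) (hs : s.Nodup) :
    (rows.foldl (fun s r => PySem.Set.update s (PySem.Dict.mk r).keys) s).Nodup := by
  induction rows generalizing s with
  | nil => exact hs
  | cons r t ih => exact ih _ (PySem.Set.nodup_update _ _ hs)

theorem getD_rank_of_not_mem (c : String) (h : c ∉ pvPreferred) :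
    PySem.Dict.getD pvRank c (pvPreferred.length : Int) = (pvPreferred.length : Int) := by
  have hk : pvRank.keys = pvPreferred := by decide
  have : pvRank.get? c = none := by
    rw [PySem.Dict.get?_eq_none_iff_not_mem_keys, hk]; exact h
  simp [PySem.Dict.getD, this]

theorem unique_columns_eq (rows : List (List (String × String))) :
    unique_columns rows = unique_columns_alt rows := by
  unfold unique_columns unique_columns_alt
  rw [show ((PySem.List.enumerate pvPreferred 0).foldl (fun d p => d.insert p.2 p.1) PySem.Dict.empty) = pvRank from rfl]
  set cols := rows.foldl (fun s r => PySem.Set.update s (PySem.Dict.mk r).keys) PySem.Set.empty with hcols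
  rw [sorted2_eq_sorted_lex]
  rw [show (fun c => toLex (PySem.Dict.getD pvRank c (pvPreferred.length : Int), c)) = pvKey from rfl]
  have hndc : cols.Nodup := nodup_cols rows _ List.nodup_nil
  have hnp : pvPreferred.Nodup := by decide
  -- the left-hand side, named
  set lhs := pvPreferred.filter (fun c => PySem.Set.contains cols c) ++
      (PySem.List.sorted cols (fun c => c)).filter (fun c => !pvPreferred.contains c) with hlhs
  -- permutation with cols
  have h1 : (pvPreferred.filter (fun c => PySem.Set.contains cols c)).Perm
      (cols.filter (fun c => pvPreferred.contains c)) := by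
    rw [List.perm_ext_iff_of_nodup (hnp.filter _) (hndc.filter _)]
    intro a
    simp only [List.mem_filter, PySem.Set.contains, List.contains_iff_mem]
    tauto
  have h2 : ((PySem.List.sorted cols (fun c => c)).filter (fun c => !pvPreferred.contains c)).Perm
      (cols.filter (fun c => !pvPreferred.contains c)) :=
    (PySem.List.sorted_perm cols (fun c => c) false).filter _
  have hperm : lhs.Perm cols :=
    (h1.append h2).trans (List.filter_append_perm (fun c => pvPreferred.contains c) cols)
  -- strict pairwise under pvKey
  have hlt15 : ∀ c ∈ pvPreferred, PySem.Dict.getD pvRank c (pvPreferred.length : Int) < (pvPreferred.length : Int) := by decide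
  have hpw1 : List.Pairwise (fun a b => pvKey a < pvKey b)
      (pvPreferred.filter (fun c => PySem.Set.contains cols c)) := by
    have base : List.Pairwise (fun a b =>
        PySem.Dict.getD pvRank a (pvPreferred.length : Int) < PySem.Dict.getD pvRank b (pvPreferred.length : Int)) pvPreferred := by decide
    exact (base.filter _).imp (fun h => by
      rw [pvKey, pvKey, Prod.Lex.toLex_lt_toLex]; exact Or.inl h)
  have hpw2 : List.Pairwise (fun a b => pvKey a < pvKey b)
      ((PySem.List.sorted cols (fun c => c)).filter (fun c => !pvPreferred.contains c)) := by
    have hle : List.Pairwise (fun a b : String => a ≤ b) (PySem.List.sorted cols (fun c => c)) :=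
      PySem.List.sorted_pairwise cols (fun c => c)
    have hnds : (PySem.List.sorted cols (fun c => c)).Nodup :=
      (PySem.List.sorted_perm cols (fun c => c) false).nodup_iff.mpr hndc
    have hlt : List.Pairwise (fun a b : String => a < b) (PySem.List.sorted cols (fun c => c)) :=
      (hle.and hnds).imp (fun ⟨hab, hne⟩ => lt_of_le_of_ne hab hne)
    rw [List.pairwise_filter]
    refine (List.pairwise_filter.mp (hlt.filter (fun c => !pvPreferred.contains c))).imp ?_
    intro a b h ha hb
    have ha' : a ∉ pvPreferred := by simpa using ha
    have hb' : b ∉ pvPreferred := by simpa using hb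
    rw [pvKey, pvKey, Prod.Lex.toLex_lt_toLex,
      getD_rank_of_not_mem a ha', getD_rank_of_not_mem b hb']
    exact Or.inr ⟨rfl, h ha hb⟩
  have hcross : ∀ a ∈ pvPreferred.filter (fun c => PySem.Set.contains cols c),
      ∀ b ∈ (PySem.List.sorted cols (fun c => c)).filter (fun c => !pvPreferred.contains c),
      pvKey a < pvKey b := by
    intro a ha b hb
    have ha' : a ∈ pvPreferred := (List.mem_filter.mp ha).1
    have hb' : b ∉ pvPreferred := by
      have := (List.mem_filter.mp hb).2; simpa using this
    rw [pvKey, pvKey, Prod.Lex.toLex_lt_toLex, getD_rank_of_not_mem b hb']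
    exact Or.inl (hlt15 a ha')
  have hpw : List.Pairwise (fun a b => pvKey a < pvKey b) lhs :=
    List.pairwise_append.mpr ⟨hpw1, hpw2, hcross⟩
  exact (PySem.List.sorted_eq_of_perm_of_pairwise_lt cols lhs pvKey hperm hpw).symm

-- ===== VERDICT (by name: the statement is the Claim_ definition above) =====
theorem unique_columns_spec : Claim_equal_unique_columns := by
  intro rows _
  unfold Spec_unique_columns
  exact unique_columns_eq rows
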